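-- pv_equiv track=rewrite | github.com/StefanNede/BIO-Practice | 2007/cards.py | solve
-- ===== SOURCE A (Python) =====
-- from math import comb
-- from itertools import combinations
--
-- def solve(nums):
--     res = 0
--     # get points from pairs with identical values
--     for i in range(1, 11):
--         if nums.count(i) > 1:
--             res += int(comb(nums.count(i), 2))
--     # get points from groups summing to 15
--     for c in list(combinations(nums, 1)):
--         if sum(c) == 15: res += 1
--     for c in list(combinations(nums, 2)):
--         if sum(c) == 15: res += 1
--     for c in list(combinations(nums, 3)):
--         if sum(c) == 15: res += 1
--     for c in list(combinations(nums, 4)):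
--         if sum(c) == 15: res += 1
--     for c in list(combinations(nums, 5)):
--         if sum(c) == 15: res += 1
--
--     return res
-- ===== SOURCE B (Python) =====
-- def _count15(xs, i, k, t):
--     # number of ways to pick k elements from xs[i:] summing to t
--     if k == 0:
--         return 1 if t == 0 else 0
--     if i == len(xs):
--         return 0
--     return _count15(xs, i + 1, k, t) + _count15(xs, i + 1, k - 1, t - xs[i])
--
-- def solve(nums):
--     freq = {}
--     for v in nums:
--         freq[v] = freq.get(v, 0) + 1
--     res = 0
--     for i in range(1, 11):
--         c = freq.get(i, 0)
--         res += c * (c - 1) // 2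
--     for k in range(1, 6):
--         res += _count15(nums, 0, k, 15)
--     return res
-- ===== Notes on version B (the rewrite author's own statement) =====
-- stated objective: alternative
-- what changed: Replaces the five materialised itertools.combinations passes with one recursive counter of size-k subsets summing to 15 over list suffixes (no combination tuples are built), and replaces the repeated nums.count scans with a frequency dict built in one pass.
import Mathlib
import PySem

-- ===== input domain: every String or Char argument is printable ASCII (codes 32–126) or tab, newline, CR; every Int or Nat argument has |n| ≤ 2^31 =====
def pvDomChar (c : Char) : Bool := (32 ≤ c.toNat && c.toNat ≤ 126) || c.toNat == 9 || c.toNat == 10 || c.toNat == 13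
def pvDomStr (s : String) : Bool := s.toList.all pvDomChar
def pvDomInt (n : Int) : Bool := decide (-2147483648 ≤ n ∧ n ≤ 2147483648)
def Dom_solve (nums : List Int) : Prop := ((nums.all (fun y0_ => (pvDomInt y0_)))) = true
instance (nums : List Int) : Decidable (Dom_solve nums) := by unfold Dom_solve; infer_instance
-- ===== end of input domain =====

-- B replaces A's five materialised itertools.combinations passes by one recursive subset counter
-- over suffixes and A's repeated nums.count scans by a frequency dict built once (objective:
-- alternative algorithm of similar cost).

-- ===== PORT A =====
-- itertools.combinations(l, k) in Python's order: combinations containing l[0] first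
def combosA (l : List Int) (k : Nat) : List (List Int) :=
  match k, l with
  | 0, _ => [[]]
  | _ + 1, [] => []
  | k + 1, x :: r => (combosA r k).map (x :: ·) ++ combosA r (k + 1)

def solve (nums : List Int) : Int :=
  let res : Int := 0
  -- for i in range(1, 11): if nums.count(i) > 1: res += int(comb(nums.count(i), 2))
  let res := (PySem.List.pyRange 1 11 1).foldl (fun res i =>
      if ((PySem.List.count nums i : Int)) > 1
      then res + (((PySem.List.count nums i : Int).toNat.choose 2 : Nat) : Int)
      else res) res
  let res := (combosA nums 1).foldl (fun res c => if c.sum = 15 then res + 1 else res) res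
  let res := (combosA nums 2).foldl (fun res c => if c.sum = 15 then res + 1 else res) res
  let res := (combosA nums 3).foldl (fun res c => if c.sum = 15 then res + 1 else res) res
  let res := (combosA nums 4).foldl (fun res c => if c.sum = 15 then res + 1 else res) res
  let res := (combosA nums 5).foldl (fun res c => if c.sum = 15 then res + 1 else res) res
  res

-- ===== PORT B =====
-- _count15(xs, i, k, t): i only ever ranges over 0..len(xs), so Python's 'i == len(xs)' exit
-- test is the bounds test written here (negated) as 'i < xs.length'
def cntB (xs : List Int) (i : Nat) (k t : Int) : Int :=
  if k = 0 then (if t = 0 then 1 else 0)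
  else if h : i < xs.length then
    cntB xs (i + 1) k t + cntB xs (i + 1) (k - 1) (t - xs[i])
  else 0
termination_by xs.length - i

def solve_alt (nums : List Int) : Int :=
  let freq := nums.foldl (fun d v => d.insert v (d.getD v 0 + 1)) (PySem.Dict.empty : PySem.Dict Int Int)
  let res : Int := 0
  let res := (PySem.List.pyRange 1 11 1).foldl (fun res i =>
      let c := freq.getD i 0
      res + PySem.Int.floordiv (c * (c - 1)) 2) res
  let res := (PySem.List.pyRange 1 6 1).foldl (fun res k => res + cntB nums 0 k 15) res
  res

-- ===== PRECONDITION & SPEC =====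
def Spec_solve (nums : List Int) (out : Int) : Prop := out = solve_alt nums
instance (nums : List Int) (out : Int) : Decidable (Spec_solve nums out) := by unfold Spec_solve; infer_instance

-- ===== CLAIM (what is proved, stated in full; the proofs are below) =====
def Claim_equal_solve : Prop := ∀ (nums : List Int), Dom_solve nums → Spec_solve nums (solve nums)

-- ===== LEMMAS AND PROOFS =====

-- structural form of cntB, used only by the proofs
def gcnt (l : List Int) (k t : Int) : Int :=
  if k = 0 then (if t = 0 then 1 else 0)
  else match l with
  | [] => 0
  | x :: r => gcnt r k t + gcnt r (k - 1) (t - x)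

theorem cntB_eq_gcnt (xs : List Int) (i : Nat) (k t : Int) :
    cntB xs i k t = gcnt (xs.drop i) k t := by
  induction i, k, t using cntB.induct (xs := xs) with
  | case1 i => cases hxd : xs.drop i <;> simp [cntB, gcnt]
  | case2 i t ht => cases hxd : xs.drop i <;> simp [cntB, gcnt, ht]
  | case3 i k t hk h ih1 ih2 =>
      rw [cntB, List.drop_eq_getElem_cons h]
      simp only [hk, h, dite_true, ih1, ih2]
      conv_rhs => rw [gcnt]
      simp [hk]
  | case4 i k t hk h =>
      rw [cntB]
      have hd : xs.drop i = [] := List.drop_eq_nil_of_le (by omega)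
      rw [hd]
      simp [gcnt, hk, h]

theorem gcnt_eq_countP (l : List Int) (k : Nat) (t : Int) :
    gcnt l (k : Int) t = ((combosA l k).countP (fun c => c.sum = t) : Int) := by
  induction l generalizing k t with
  | nil =>
      cases k with
      | zero => by_cases h : t = 0 <;> simp [gcnt, combosA, h, eq_comm]
      | succ k => have : ((k:Int)+1) ≠ 0 := by omega
                  simp [gcnt, combosA, this]
  | cons x r ih =>
      cases k with
      | zero => by_cases h : t = 0 <;> simp [gcnt, combosA, h, eq_comm]
      | succ k =>
          have hk : ((k:Int)+1) ≠ 0 := by omega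
          rw [gcnt]
          simp only [Nat.cast_add, Nat.cast_one, hk, combosA, List.countP_append,
            List.countP_map, add_sub_cancel_right]
          have e1 := ih k (t - x)
          have e2 := ih (k+1) t
          push_cast at e2
          rw [e1, e2]
          have hc : (List.countP ((fun c => decide (c.sum = t)) ∘ fun c => x :: c) (combosA r k))
               = (List.countP (fun c => decide (c.sum = t - x)) (combosA r k)) := by
            apply List.countP_congr
            intro c _
            have : c.sum = t - x ↔ (x :: c).sum = t := by
              simp [List.sum_cons]; omega
            simp [this]
          rw [hc]
          push_cast
          ring

theorem cntB_eq_countP (nums : List Int) (k : Nat) (t : Int) :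
    cntB nums 0 (k : Int) t = ((combosA nums k).countP (fun c => c.sum = t) : Int) := by
  rw [cntB_eq_gcnt, List.drop_zero, gcnt_eq_countP]

theorem foldl_if_sum (l : List (List Int)) (t : Int) (r : Int) :
    l.foldl (fun res c => if c.sum = t then res + 1 else res) r
      = r + (l.countP (fun c => c.sum = t) : Int) := by
  induction l generalizing r with
  | nil => simp
  | cons c l ih =>
      by_cases h : c.sum = t <;>
        simp [List.foldl_cons, h, ih] <;> push_cast <;> ring

theorem pair_term (c : Nat) :
    (if ((c : Int)) > 1 then (((c : Int).toNat.choose 2 : Nat) : Int) else 0)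
      = PySem.Int.floordiv ((c : Int) * ((c : Int) - 1)) 2 := by
  match c with
  | 0 => simp [PySem.Int.floordiv]
  | 1 => simp [PySem.Int.floordiv]
  | (n+2) =>
      have h1 : (((n+2:Nat):Int)) > 1 := by push_cast; omega
      rw [if_pos h1]
      have h2 : (((n+2:Nat):Int)).toNat = n+2 := by omega
      rw [h2]
      have h3 : ((n+2:Nat):Int) * (((n+2:Nat):Int) - 1) = (((n+2)*(n+1) : Nat) : Int) := by
        push_cast; ring
      rw [h3, show ((2:Int)) = ((2:Nat):Int) from rfl, PySem.Int.floordiv_natCast]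
      have h4 : (n+2).choose 2 = (n+2)*(n+1)/2 := by
        rw [Nat.choose_two_right]; congr 1
      rw [h4]

theorem pairs_fold_eq (nums : List Int) (r : Int) :
    (PySem.List.pyRange 1 11 1).foldl (fun res i =>
        if ((PySem.List.count nums i : Int)) > 1
        then res + (((PySem.List.count nums i : Int).toNat.choose 2 : Nat) : Int)
        else res) r
    = (PySem.List.pyRange 1 11 1).foldl (fun res i =>
        let c := (nums.foldl (fun d v => d.insert v (d.getD v 0 + 1))
                    (PySem.Dict.empty : PySem.Dict Int Int)).getD i 0
        res + PySem.Int.floordiv (c * (c - 1)) 2) r := by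
  apply PySem.List.foldl_congr_mem
  intro res i _
  have hf : (nums.foldl (fun d v => d.insert v (d.getD v 0 + 1))
      (PySem.Dict.empty : PySem.Dict Int Int)).getD i 0 = (PySem.List.count nums i : Int) := by
    rw [PySem.Dict.getD_foldl_insert_add_one]
    simp [PySem.List.count]
  simp only [hf]
  rw [← pair_term (PySem.List.count nums i)]
  split_ifs <;> ring

-- ===== VERDICT (by name: the statement is the Claim_ definition above) =====
theorem solve_spec : Claim_equal_solve := by
  intro nums _
  show solve nums = solve_alt nums
  simp only [solve, solve_alt]
  rw [pairs_fold_eq]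
  simp only [foldl_if_sum]
  have hr : PySem.List.pyRange 1 6 1 = [1, 2, 3, 4, 5] := by decide
  rw [hr]
  simp only [List.foldl_cons, List.foldl_nil]
  rw [show (1:Int) = ((1:Nat):Int) by norm_num, show (2:Int) = ((2:Nat):Int) by norm_num,
      show (3:Int) = ((3:Nat):Int) by norm_num, show (4:Int) = ((4:Nat):Int) by norm_num,
      show (5:Int) = ((5:Nat):Int) by norm_num]
  simp only [cntB_eq_countP]
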